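-- pv_equiv track=rewrite | github.com/usernameSplash/Codeforces_solve | codeforce_1418/problemA.py | solve
-- ===== SOURCE A (Python) =====
-- def solve(x, y, k):
--     result = 0
--
--     stick_cur = 1
--     stick_goal = k + y*x
--
--     coal_cur = 0
--     coal_goal = k
--
--     while True:
--         if(stick_cur < stick_goal):
--             stick_cur += (x-1)
--             result += 1
--             continue
--         break
--
--     while True:
--         if(coal_cur < coal_goal):
--             coal_cur += 1
--             result += 1
--             continue
--         break
--
--     return result
-- ===== SOURCE B (Python) =====
-- def solve(x, y, k):
--     # Closed-form: ceiling division replaces the two counting loops.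
--     goal = k + y * x
--     sticks = 0 if goal <= 1 else -(-(goal - 1) // (x - 1))
--     return sticks + max(k, 0)
-- ===== Notes on version B (the rewrite author's own statement) =====
-- stated objective: faster
-- what changed: Replaces two counting while-loops (one step per craft) by closed-form ceiling-division arithmetic.
import Mathlib
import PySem

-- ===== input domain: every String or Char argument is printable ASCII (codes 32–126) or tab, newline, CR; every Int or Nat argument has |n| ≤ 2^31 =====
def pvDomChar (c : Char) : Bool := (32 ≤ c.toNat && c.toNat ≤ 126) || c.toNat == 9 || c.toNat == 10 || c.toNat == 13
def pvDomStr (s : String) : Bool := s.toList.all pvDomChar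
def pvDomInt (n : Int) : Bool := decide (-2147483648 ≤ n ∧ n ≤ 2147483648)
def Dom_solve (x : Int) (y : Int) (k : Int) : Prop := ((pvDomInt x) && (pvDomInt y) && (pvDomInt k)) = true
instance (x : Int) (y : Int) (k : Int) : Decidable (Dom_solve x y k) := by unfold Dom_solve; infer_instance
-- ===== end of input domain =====

-- B replaces A's two counting while-loops by closed-form ceiling-division arithmetic (asymptotically faster).
-- Pre_solve excludes exactly the inputs where A's first loop never terminates (x ≤ 1 with k + y*x > 1).


-- ===== PORT A =====
-- first while-loop: stick_cur += (x-1), result += 1, until stick_cur ≥ stick_goal.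
-- The inner '2 ≤ x' test is only a totality guard (Python diverges there; outside Pre_solve).
def solveStickLoop (x : Int) (goal : Int) (cur : Int) (result : Int) : Int :=
  if _h : cur < goal then
    if hx : 2 ≤ x then solveStickLoop x goal (cur + (x - 1)) (result + 1) else result
  else result
termination_by (goal - cur).toNat
decreasing_by omega

-- second while-loop: coal_cur += 1, result += 1, until coal_cur ≥ coal_goal
def solveCoalLoop (goal : Int) (cur : Int) (result : Int) : Int :=
  if _h : cur < goal then solveCoalLoop goal (cur + 1) (result + 1) else result
termination_by (goal - cur).toNat
decreasing_by omega

def solve (x : Int) (y : Int) (k : Int) : Int :=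
  solveCoalLoop k 0 (solveStickLoop x (k + y * x) 1 0)

-- ===== PORT B =====
def solve_alt (x : Int) (y : Int) (k : Int) : Int :=
  let goal := k + y * x
  let sticks := if goal ≤ 1 then 0 else -(PySem.Int.floordiv (-(goal - 1)) (x - 1))
  sticks + max k 0

-- ===== PRECONDITION & SPEC =====
-- Pre_ excludes only inputs on which Python A DIVERGES (x ≤ 1 while the stick goal is still unreached).
def Pre_solve (x : Int) (y : Int) (k : Int) : Prop := 1 < k + y * x → 2 ≤ x
instance (x : Int) (y : Int) (k : Int) : Decidable (Pre_solve x y k) := by unfold Pre_solve; infer_instance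
def pvWitness_solve : Int × Int × Int := (2, 1, 5)

def Spec_solve (x : Int) (y : Int) (k : Int) (out : Int) : Prop := out = solve_alt x y k
instance (x : Int) (y : Int) (k : Int) (out : Int) : Decidable (Spec_solve x y k out) := by unfold Spec_solve; infer_instance

-- ===== CLAIM (what is proved, stated in full; the proofs are below) =====
def Claim_equal_solve : Prop := ∀ (x : Int) (y : Int) (k : Int), Dom_solve x y k → Pre_solve x y k → Spec_solve x y k (solve x y k)

-- ===== LEMMAS AND PROOFS =====
theorem solveCoalLoop_eq (goal cur result : Int) :
    solveCoalLoop goal cur result = result + max (goal - cur) 0 := by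
  unfold solveCoalLoop
  split
  · rw [solveCoalLoop_eq goal (cur + 1) (result + 1)]; omega
  · omega
termination_by (goal - cur).toNat
decreasing_by omega

theorem solveStickLoop_eq (x goal cur result : Int) (hx : 2 ≤ x) (h : cur < goal) :
    solveStickLoop x goal cur result = result + -(PySem.Int.floordiv (-(goal - cur)) (x - 1)) := by
  unfold solveStickLoop
  rw [dif_pos h, dif_pos hx]
  by_cases h2 : cur + (x - 1) < goal
  · rw [solveStickLoop_eq x goal (cur + (x - 1)) (result + 1) hx h2]
    have hb : (0:Int) < x - 1 := by omega
    have h1 : -(PySem.Int.floordiv (-(goal - cur)) (x - 1))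
        = 1 + -(PySem.Int.floordiv (-(goal - (cur + (x - 1)))) (x - 1)) := by
      rw [PySem.Int.neg_floordiv_neg_eq_iff_of_pos hb]
      have h2' := (PySem.Int.neg_floordiv_neg_eq_iff_of_pos (a := goal - (cur + (x - 1))) (b := x - 1)
          (q := -(PySem.Int.floordiv (-(goal - (cur + (x - 1)))) (x - 1))) hb).mp rfl
      constructor <;> nlinarith [h2'.1, h2'.2]
    rw [h1]; ring
  · unfold solveStickLoop
    rw [dif_neg (by omega)]
    have hb : (0:Int) < x - 1 := by omega
    have h1 : -(PySem.Int.floordiv (-(goal - cur)) (x - 1)) = 1 := by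
      rw [PySem.Int.neg_floordiv_neg_eq_iff_of_pos hb]; omega
    rw [h1]
termination_by (goal - cur).toNat
decreasing_by omega

-- ===== VERDICT (by name: the statement is the Claim_ definition above) =====
theorem solve_spec : Claim_equal_solve := by
  intro x y k _ hpre
  unfold Spec_solve solve solve_alt
  rw [solveCoalLoop_eq]
  by_cases hg : k + y * x ≤ 1
  · unfold solveStickLoop
    rw [dif_neg (by omega)]
    simp only [if_pos hg]
    omega
  · have hx : 2 ≤ x := hpre (by omega)
    rw [solveStickLoop_eq x (k + y * x) 1 0 hx (by omega)]
    simp only [if_neg hg]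
    omega
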